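-- pv_equiv track=rewrite | github.com/TooDamnTragic/Supplementary-Instructor-material | exam2_demo.py | compute_smallest_addition
-- ===== SOURCE A (Python) =====
-- def compute_smallest_addition(list_c, list_d):
--     #For each point in list_c, find the point in list_d with closest X val
--     #Returns a list of tuples: [(best_match_index_in_list_d, sum_of_those_x_values), ...]
--     results = []
--     for c_x, c_y in list_c:
--         min_diff = float('inf')
--         min_index = -1
--
--         for idx_d, (d_x, d_y) in enumerate(list_d):
--             diff = abs(c_x - d_x)
--             if diff < min_diff:
--                 min_diff = diff
--                 min_index = idx_d
--
--         # x-coord of c plus the x-coord of the found point in d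
--         sum_of_x = c_x + list_d[min_index][0]
--         results.append((min_index, sum_of_x))
--
--     return results
-- ===== SOURCE B (Python) =====
-- def compute_smallest_addition(list_c, list_d):
--     # Index list_d once (first occurrence of each distinct x), then answer each
--     # query by binary search over the sorted distinct x values.
--     first = {}
--     for i, (x, _y) in enumerate(list_d):
--         if x not in first:
--             first[x] = i
--     xs = sorted(first)
--     n = len(xs)
--     results = []
--     for c_x, _c_y in list_c:
--         lo, hi = 0, n
--         while lo < hi:
--             mid = (lo + hi) // 2
--             if xs[mid] < c_x:
--                 lo = mid + 1
--             else:
--                 hi = mid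
--         best_x = min(xs[max(lo - 1, 0):lo + 1],
--                      key=lambda x: (abs(c_x - x), first[x]))
--         results.append((first[best_x], c_x + best_x))
--     return results
-- ===== Notes on version B (the rewrite author's own statement) =====
-- stated objective: faster
-- what changed: A rescans all of list_d for every point of list_c; B builds a first-occurrence index of the distinct x values of list_d once, sorts them, and answers each query with a hand-written binary search plus a two-candidate comparison that reproduces A's tie-breaking (smallest original index).
-- outside the precondition, e.g. on compute_smallest_addition([(1, 0)], []): A raises IndexError, B raises ValueError
import Mathlib
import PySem

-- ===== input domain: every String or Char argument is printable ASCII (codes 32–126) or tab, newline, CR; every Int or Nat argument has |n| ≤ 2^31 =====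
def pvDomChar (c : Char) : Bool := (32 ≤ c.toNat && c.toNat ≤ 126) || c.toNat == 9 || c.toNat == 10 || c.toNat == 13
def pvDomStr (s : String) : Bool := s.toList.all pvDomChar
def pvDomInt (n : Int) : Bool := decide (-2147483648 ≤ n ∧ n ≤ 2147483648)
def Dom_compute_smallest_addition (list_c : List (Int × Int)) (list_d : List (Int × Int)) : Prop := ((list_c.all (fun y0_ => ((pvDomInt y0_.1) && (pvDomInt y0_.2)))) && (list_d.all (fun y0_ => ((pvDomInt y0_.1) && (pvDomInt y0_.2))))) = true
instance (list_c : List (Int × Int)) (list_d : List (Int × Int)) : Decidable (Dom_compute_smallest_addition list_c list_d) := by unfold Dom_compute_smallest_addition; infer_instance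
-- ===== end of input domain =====

-- B replaces A's per-query linear scan of list_d by a one-off first-occurrence index plus a
-- binary search over the sorted distinct x values (objective: faster, asymptotic).

-- ===== PORT A =====
-- inner 'for idx_d, (d_x, d_y) in enumerate(list_d)' loop; minDiff = none models float('inf')
def pvAScan (c_x : Int) : List (Int × Int) → Int → Option Int × Int → Option Int × Int
  | [], _, st => st
  | (d_x, _d_y) :: rest, idx, (minDiff, minIdx) =>
      let diff := |c_x - d_x|
      if (match minDiff with | none => true | some m => decide (diff < m)) then
        pvAScan c_x rest (idx + 1) (some diff, idx)
      else
        pvAScan c_x rest (idx + 1) (minDiff, minIdx)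

def compute_smallest_addition (list_c : List (Int × Int)) (list_d : List (Int × Int)) : List (Int × Int) :=
  list_c.foldl (fun results c =>
    let scan := pvAScan c.1 list_d 0 (none, -1)
    let min_index := scan.2
    -- list_d[min_index][0]; pyGet? = none is exactly Python's IndexError (excluded by Pre_)
    let sum_of_x := c.1 + (match PySem.List.pyGet? list_d min_index with
                           | some p => p.1
                           | none => 0)
    results ++ [(min_index, sum_of_x)]) []

-- ===== PORT B =====
-- 'first = {}; for i, (x, _y) in enumerate(list_d): if x not in first: first[x] = i'
def pvFirst (list_d : List (Int × Int)) : PySem.Dict Int Int :=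
  (PySem.List.enumerate list_d 0).foldl
    (fun d p => if d.contains p.2.1 then d else d.insert p.2.1 p.1) PySem.Dict.empty

-- the hand-written 'while lo < hi' binary-search loop of Source B; the loop shrinks hi-lo every
-- iteration, so fuel = initial (hi-lo) = len(xs) makes the recursion structural
def pvBisect (xs : List Int) (c_x : Int) : Nat → Int → Int → Int
  | 0, lo, _hi => lo
  | fuel + 1, lo, hi =>
      if lo < hi then
        let mid := PySem.Int.floordiv (lo + hi) 2
        if PySem.List.pyGetD xs mid 0 < c_x then  -- xs[mid]; mid is always in range here
          pvBisect xs c_x fuel (mid + 1) hi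
        else
          pvBisect xs c_x fuel lo mid
      else lo

def compute_smallest_addition_alt (list_c : List (Int × Int)) (list_d : List (Int × Int)) : List (Int × Int) :=
  let first := pvFirst list_d
  let xs := PySem.List.sorted first.keys (fun x => x) false
  let n := xs.length
  list_c.foldl (fun results c =>
    let lo := pvBisect xs c.1 n 0 (n : Int)
    -- min(xs[max(lo-1,0):lo+1], key=lambda x: (abs(c_x - x), first[x]))
    match PySem.List.min2? (PySem.List.slice xs (some (max (lo - 1) 0)) (some (lo + 1)))
        (fun x => |c.1 - x|) (fun x => first.getD x 0) with
    | some best_x => results ++ [(first.getD best_x 0, c.1 + best_x)]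
    | none => results) []  -- none = Python's ValueError on min([]) (empty list_d; excluded by Pre_)

-- ===== PRECONDITION & SPEC =====
-- Pre_ excludes only inputs on which A raises: with list_d empty and list_c nonempty,
-- A's inner loop never runs and list_d[-1] raises IndexError (B's min([]) raises ValueError too).
def Pre_compute_smallest_addition (list_c : List (Int × Int)) (list_d : List (Int × Int)) : Prop :=
  list_c = [] ∨ list_d ≠ []
instance (list_c : List (Int × Int)) (list_d : List (Int × Int)) : Decidable (Pre_compute_smallest_addition list_c list_d) := by unfold Pre_compute_smallest_addition; infer_instance

def pvWitness_compute_smallest_addition : (List (Int × Int)) × (List (Int × Int)) :=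
  ([(1, 2), (5, 0)], [(3, 1), (1, 1)])

def Spec_compute_smallest_addition (list_c : List (Int × Int)) (list_d : List (Int × Int)) (out : List (Int × Int)) : Prop := out = compute_smallest_addition_alt list_c list_d
instance (list_c : List (Int × Int)) (list_d : List (Int × Int)) (out : List (Int × Int)) : Decidable (Spec_compute_smallest_addition list_c list_d out) := by unfold Spec_compute_smallest_addition; infer_instance

-- ===== CLAIM (what is proved, stated in full; the proofs are below) =====
def Claim_equal_compute_smallest_addition : Prop := ∀ (list_c : List (Int × Int)) (list_d : List (Int × Int)), Dom_compute_smallest_addition list_c list_d → Pre_compute_smallest_addition list_c list_d → Spec_compute_smallest_addition list_c list_d (compute_smallest_addition list_c list_d)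

-- ===== LEMMAS AND PROOFS =====

-- "(m, i) is the result A's argmin scan must produce on x-coordinates dx":
-- i is the first index attaining the minimal |c - x|, and m is that minimum.
def pvBest (c : Int) (dx : List Int) (m i : Int) : Prop :=
  ∃ k : Nat, i = (k : Int) ∧ ∃ x, dx[k]? = some x ∧ m = |c - x| ∧
    (∀ (j : Nat) (x' : Int), dx[j]? = some x' → m ≤ |c - x'|) ∧
    (∀ (j : Nat), j < k → ∀ (x' : Int), dx[j]? = some x' → m < |c - x'|)

lemma pvBest_unique {c : Int} {dx : List Int} {m i m' i' : Int}
    (h : pvBest c dx m i) (h' : pvBest c dx m' i') : m = m' ∧ i = i' := by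
  obtain ⟨k, hik, x, hx, hm, hmin, hstr⟩ := h
  obtain ⟨k', hik', x', hx', hm', hmin', hstr'⟩ := h'
  have h1 : m ≤ m' := by have := hmin k' x' hx'; omega
  have h2 : m' ≤ m := by have := hmin' k x hx; omega
  have hk : k = k' := by
    rcases Nat.lt_trichotomy k k' with h | h | h
    · have := hstr' k h x hx; omega
    · exact h
    · have := hstr k' h x' hx'; omega
  subst hk; exact ⟨by omega, by omega⟩

lemma pvAScan_some (c : Int) :
    ∀ (l : List (Int × Int)) (n : Nat) (m i : Int),
    ∃ m' i', pvAScan c l (n : Int) (some m, i) = (some m', i') ∧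
      ((m' = m ∧ i' = i ∧ ∀ (j : Nat) (x' : Int), (l.map (·.1))[j]? = some x' → m ≤ |c - x'|)
       ∨ (∃ (k : Nat) (x : Int), (l.map (·.1))[k]? = some x ∧ i' = ((n + k : Nat) : Int) ∧
            m' = |c - x| ∧ m' < m ∧
            (∀ (j : Nat) (x' : Int), (l.map (·.1))[j]? = some x' → m' ≤ |c - x'|) ∧
            (∀ (j : Nat), j < k → ∀ (x' : Int), (l.map (·.1))[j]? = some x' → m' < |c - x'|))) := by
  intro l
  induction l with
  | nil =>
      intro n m i
      exact ⟨m, i, rfl, Or.inl ⟨rfl, rfl, by intro j x' h; simp at h⟩⟩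
  | cons p rest ih =>
      intro n m i
      obtain ⟨dx, dy⟩ := p
      by_cases hlt : |c - dx| < m
      · have hstep : pvAScan c ((dx, dy) :: rest) (n : Int) (some m, i)
            = pvAScan c rest ((n : Int) + 1) (some (|c - dx|), (n : Int)) := by
          simp [pvAScan, hlt]
        obtain ⟨m', i', hrun, hcase⟩ := ih (n + 1) (|c - dx|) (n : Int)
        refine ⟨m', i', by rw [hstep, ← hrun]; norm_num, Or.inr ?_⟩
        rcases hcase with ⟨hm', hi', hall⟩ | ⟨k, x, hx, hi', hm', hlt', hall, hstr⟩
        · refine ⟨0, dx, by simp, by omega, by omega, by omega, ?_, by omega⟩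
          intro j x' h
          cases j with
          | zero => simp at h; subst h; omega
          | succ j => have := hall j x' (by simpa using h); omega
        · refine ⟨k + 1, x, by simpa using hx, by push_cast; push_cast at hi'; omega,
            hm', by omega, ?_, ?_⟩
          · intro j x' h
            cases j with
            | zero => simp at h; subst h; omega
            | succ j => exact hall j x' (by simpa using h)
          · intro j hj x' h
            cases j with
            | zero => simp at h; subst h; omega
            | succ j => exact hstr j (by omega) x' (by simpa using h)
      · have hstep : pvAScan c ((dx, dy) :: rest) (n : Int) (some m, i)
            = pvAScan c rest ((n : Int) + 1) (some m, i) := by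
          simp [pvAScan, hlt]
        obtain ⟨m', i', hrun, hcase⟩ := ih (n + 1) m i
        refine ⟨m', i', by rw [hstep, ← hrun]; norm_num, ?_⟩
        rcases hcase with ⟨hm', hi', hall⟩ | ⟨k, x, hx, hi', hm', hlt', hall, hstr⟩
        · refine Or.inl ⟨hm', hi', ?_⟩
          intro j x' h
          cases j with
          | zero => simp at h; subst h; omega
          | succ j => exact hall j x' (by simpa using h)
        · refine Or.inr ⟨k + 1, x, by simpa using hx, by push_cast; push_cast at hi'; omega,
            hm', by omega, ?_, ?_⟩
          · intro j x' h
            cases j with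
            | zero => simp at h; subst h; omega
            | succ j => exact hall j x' (by simpa using h)
          · intro j hj x' h
            cases j with
            | zero => simp at h; subst h; omega
            | succ j => exact hstr j (by omega) x' (by simpa using h)

lemma pvAScan_best (c x0 y0 : Int) (rest : List (Int × Int)) :
    ∃ m i, pvAScan c ((x0, y0) :: rest) 0 (none, -1) = (some m, i) ∧
      pvBest c (((x0, y0) :: rest).map (·.1)) m i := by
  have hstep : pvAScan c ((x0, y0) :: rest) 0 (none, -1)
      = pvAScan c rest ((0 : Int) + 1) (some (|c - x0|), (0 : Int)) := by
    simp [pvAScan]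
  obtain ⟨m', i', hrun, hcase⟩ := pvAScan_some c rest 1 (|c - x0|) 0
  have hrun' : pvAScan c ((x0, y0) :: rest) 0 (none, -1) = (some m', i') := by
    rw [hstep, ← hrun]; norm_num
  refine ⟨m', i', hrun', ?_⟩
  rcases hcase with ⟨hm', hi', hall⟩ | ⟨k, x, hx, hi', hm', hlt', hall, hstr⟩
  · refine ⟨0, by omega, x0, by simp, by omega, ?_, by omega⟩
    intro j x' h
    cases j with
    | zero => simp at h; subst h; omega
    | succ j => have := hall j x' (by simpa using h); omega
  · refine ⟨k + 1, by push_cast; push_cast at hi'; omega, x, by simpa using hx, hm', ?_, ?_⟩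
    · intro j x' h
      cases j with
      | zero => simp at h; subst h; omega
      | succ j => exact hall j x' (by simpa using h)
    · intro j hj x' h
      cases j with
      | zero => simp at h; subst h; omega
      | succ j => exact hstr j (by omega) x' (by simpa using h)

lemma pvDict_contains_isSome (G : PySem.Dict Int Int) (x : Int) :
    G.contains x = (G.get? x).isSome := by
  rw [Bool.eq_iff_iff]
  simp [PySem.Dict.contains, PySem.Dict.get?, Option.isSome_map, List.find?_isSome, List.any_eq_true]
lemma pvDict_get?_none (G : PySem.Dict Int Int) (x : Int) (h : G.contains x = false) :
    G.get? x = none := by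
  simp [PySem.Dict.contains, List.any_eq_false] at h
  simp [PySem.Dict.get?, List.find?_eq_none]
  exact fun p hp => h p hp
lemma pvDict_keys_insert_fresh (G : PySem.Dict Int Int) (x : Int) (v : Int)
    (h : G.contains x = false) : (G.insert x v).keys = G.keys ++ [x] := by
  simp [PySem.Dict.insert, h, PySem.Dict.keys]
lemma pvDict_mem_keys (G : PySem.Dict Int Int) (x : Int) :
    x ∈ G.keys ↔ G.contains x = true := by
  simp [PySem.Dict.keys, PySem.Dict.contains, List.any_eq_true, List.mem_map]

lemma pvFirst_loop :
    ∀ (l : List (Int × Int)) (n : Nat) (G : PySem.Dict Int Int), G.keys.Nodup →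
    (((PySem.List.enumerate l (n : Int)).foldl
        (fun d p => if d.contains p.2.1 then d else d.insert p.2.1 p.1) G).keys.Nodup ∧
     ∀ x : Int, ((PySem.List.enumerate l (n : Int)).foldl
        (fun d p => if d.contains p.2.1 then d else d.insert p.2.1 p.1) G).get? x =
          if G.contains x then G.get? x
          else (PySem.List.index? (l.map (·.1)) x).map (fun k => ((n + k : Nat) : Int))) := by
  intro l
  induction l with
  | nil =>
      intro n G hG
      refine ⟨by simpa [PySem.List.enumerate] using hG, ?_⟩
      intro x
      by_cases h : G.contains x
      · simp [PySem.List.enumerate, h]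
      · simp [PySem.List.enumerate, h, pvDict_get?_none G x (by simpa using h)]
  | cons p rest ih =>
      intro n G hG
      obtain ⟨px, py⟩ := p
      rw [show ((n : Nat) : Int) = n by rfl] at *
      by_cases hc : G.contains px
      · -- key already present: dict unchanged this step
        have hfold : (PySem.List.enumerate ((px, py) :: rest) (n : Int)).foldl
              (fun d p => if d.contains p.2.1 then d else d.insert p.2.1 p.1) G
            = (PySem.List.enumerate rest ((n : Int) + 1)).foldl
              (fun d p => if d.contains p.2.1 then d else d.insert p.2.1 p.1) G := by
          simp [PySem.List.enumerate_cons, hc]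
        have hcast : ((n : Int) + 1) = ((n + 1 : Nat) : Int) := by push_cast; ring
        obtain ⟨hnd, hget⟩ := ih (n + 1) G hG
        rw [hfold, hcast]
        refine ⟨hnd, ?_⟩
        intro x
        rw [hget x]
        by_cases hx : G.contains x
        · simp [hx]
        · have hne : px ≠ x := by rintro rfl; rw [hc] at hx; exact hx rfl
          simp only [List.map_cons]
          rw [PySem.List.index?_cons_of_ne _ hne]
          rcases h' : PySem.List.index? (rest.map (·.1)) x with _ | k <;> rw [h'] <;>
            simp [hx] <;> omega
      · -- fresh key: it is inserted with value n
        have hfold : (PySem.List.enumerate ((px, py) :: rest) (n : Int)).foldl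
              (fun d p => if d.contains p.2.1 then d else d.insert p.2.1 p.1) G
            = (PySem.List.enumerate rest ((n : Int) + 1)).foldl
              (fun d p => if d.contains p.2.1 then d else d.insert p.2.1 p.1)
              (G.insert px (n : Int)) := by
          simp [PySem.List.enumerate_cons, hc]
        have hkeys : (G.insert px (n : Int)).keys = G.keys ++ [px] :=
          pvDict_keys_insert_fresh G px _ (by simpa using hc)
        have hnd' : (G.insert px (n : Int)).keys.Nodup := by
          rw [hkeys]
          refine List.Nodup.append hG (by simp) ?_
          intro a ha hb
          simp at hb; subst hb
          rw [pvDict_mem_keys] at ha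
          exact hc ha
        have hcast : ((n : Int) + 1) = ((n + 1 : Nat) : Int) := by push_cast; ring
        obtain ⟨hnd, hget⟩ := ih (n + 1) (G.insert px (n : Int)) hnd'
        rw [hfold, hcast]
        refine ⟨hnd, ?_⟩
        intro x
        rw [hget x]
        have hcontains' : (G.insert px (n : Int)).contains x
            = (decide (x = px) || G.contains x) := by
          rw [Bool.eq_iff_iff]
          simp [← pvDict_mem_keys, hkeys]
          tauto
        by_cases hxp : x = px
        · subst hxp
          simp [hcontains', PySem.Dict.get?_insert_self, List.idxOf?_cons, hc]
        · have h1 : (G.insert px (n : Int)).contains x = G.contains x := by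
            simp [hcontains', hxp]
          rw [h1]
          by_cases hx : G.contains x
          · simp [hx, PySem.Dict.get?_insert_of_ne G _ hxp]
          · have hne : px ≠ x := fun h => hxp h.symm
            simp only [List.map_cons]
            rw [PySem.List.index?_cons_of_ne _ hne]
            rcases h' : PySem.List.index? (rest.map (·.1)) x with _ | k <;> rw [h'] <;>
              simp [hx] <;> omega

lemma pvFirst_spec (list_d : List (Int × Int)) :
    (pvFirst list_d).keys.Nodup ∧
    ∀ x : Int, (pvFirst list_d).get? x =
      Option.map (Nat.cast : Nat → Int) (PySem.List.index? (list_d.map (·.1)) x) := by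
  have h := pvFirst_loop list_d 0 PySem.Dict.empty (by simp [PySem.Dict.empty, PySem.Dict.keys])
  rw [Nat.cast_zero] at h
  refine ⟨h.1, ?_⟩
  intro x
  rw [show pvFirst list_d = (PySem.List.enumerate list_d 0).foldl
    (fun d p => if d.contains p.2.1 then d else d.insert p.2.1 p.1) PySem.Dict.empty from rfl]
  rw [h.2 x]
  have hcf : (PySem.Dict.empty : PySem.Dict Int Int).contains x = false := by
    simp [PySem.Dict.empty, PySem.Dict.contains]
  rw [hcf]
  simp only [Bool.false_eq_true, if_false]
  cases hq : PySem.List.index? (list_d.map (·.1)) x with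
  | none => rfl
  | some kk => simp

lemma pvBisect_spec (xs : List Int) (c : Int) (hs : xs.Pairwise (· ≤ ·)) :
    ∀ (fuel lo hi : Nat), lo ≤ hi → hi ≤ xs.length → hi - lo ≤ fuel →
    (∀ j : Nat, j < lo → ∀ x, xs[j]? = some x → x < c) →
    (∀ j : Nat, hi ≤ j → ∀ x, xs[j]? = some x → ¬ x < c) →
    ∃ k : Nat, pvBisect xs c fuel (lo : Int) (hi : Int) = (k : Int) ∧ lo ≤ k ∧ k ≤ hi ∧
      (∀ j : Nat, j < k → ∀ x, xs[j]? = some x → x < c) ∧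
      (∀ j : Nat, k ≤ j → ∀ x, xs[j]? = some x → ¬ x < c) := by
  have hmono := List.pairwise_iff_getElem.mp hs
  intro fuel
  induction fuel with
  | zero =>
      intro lo hi h1 h2 h3 hlow hhigh
      have : lo = hi := by omega
      subst this
      exact ⟨lo, rfl, le_refl _, le_refl _, hlow, hhigh⟩
  | succ fuel ih =>
      intro lo hi h1 h2 h3 hlow hhigh
      by_cases hlt : lo < hi
      · have hstep1 : ((lo : Int) < (hi : Int)) := by exact_mod_cast hlt
        set mid := (lo + hi) / 2 with hmid
        have hmidcast : PySem.Int.floordiv ((lo : Int) + (hi : Int)) 2 = (mid : Int) := by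
          rw [show ((lo : Int) + (hi : Int)) = ((lo + hi : Nat) : Int) by push_cast; ring]
          exact_mod_cast PySem.Int.floordiv_natCast (lo + hi) 2
        have hmlo : lo ≤ mid := by omega
        have hmhi : mid < hi := by omega
        have hmlen : mid < xs.length := by omega
        have hgetd : PySem.List.pyGetD xs (mid : Int) 0 = xs[mid] := by
          rw [PySem.List.pyGetD_natCast, List.getD_eq_getElem?_getD, List.getElem?_eq_getElem hmlen]
          rfl
        rw [show pvBisect xs c (fuel + 1) (lo : Int) (hi : Int)
            = if PySem.List.pyGetD xs (PySem.Int.floordiv ((lo : Int) + (hi : Int)) 2) 0 < c then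
                pvBisect xs c fuel (PySem.Int.floordiv ((lo : Int) + (hi : Int)) 2 + 1) (hi : Int)
              else pvBisect xs c fuel (lo : Int) (PySem.Int.floordiv ((lo : Int) + (hi : Int)) 2)
          from by simp [pvBisect, hstep1]]
        rw [hmidcast, hgetd]
        by_cases hv : xs[mid] < c
        · rw [if_pos hv]
          have hlow' : ∀ j : Nat, j < mid + 1 → ∀ x, xs[j]? = some x → x < c := by
            intro j hj x hx
            have hjlen : j < xs.length := by
              by_contra hcon
              simp [List.getElem?_eq_none (show xs.length ≤ j by omega)] at hx
            rw [List.getElem?_eq_getElem hjlen] at hx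
            obtain rfl : xs[j] = x := by simpa using hx
            rcases Nat.lt_or_ge j mid with h | h
            · exact lt_of_le_of_lt (hmono j mid hjlen hmlen h) hv
            · have : j = mid := by omega
              subst this; exact hv
          have := ih (mid + 1) hi (by omega) h2 (by omega) hlow' hhigh
          rw [show ((mid : Int) + 1) = ((mid + 1 : Nat) : Int) by push_cast; ring]
          obtain ⟨k, hk, h4, h5, h6, h7⟩ := this
          exact ⟨k, hk, by omega, h5, h6, h7⟩
        · rw [if_neg hv]
          have hhigh' : ∀ j : Nat, mid ≤ j → ∀ x, xs[j]? = some x → ¬ x < c := by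
            intro j hj x hx
            have hjlen : j < xs.length := by
              by_contra hcon
              simp [List.getElem?_eq_none (show xs.length ≤ j by omega)] at hx
            rw [List.getElem?_eq_getElem hjlen] at hx
            obtain rfl : xs[j] = x := by simpa using hx
            rcases Nat.lt_or_ge mid j with h | h
            · exact fun hcon => hv (lt_of_le_of_lt (hmono mid j hmlen hjlen h) hcon)
            · have : j = mid := by omega
              subst this; exact hv
          have := ih lo mid (by omega) (by omega) (by omega) hlow hhigh'
          obtain ⟨k, hk, h4, h5, h6, h7⟩ := this
          exact ⟨k, hk, h4, by omega, h6, h7⟩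
      · have : lo = hi := by omega
        subst this
        exact ⟨lo, by simp [pvBisect], le_refl _, le_refl _, hlow, hhigh⟩

-- B's per-query step produces the pvBest pair
lemma pvAlt_step (list_d : List (Int × Int)) (hd : list_d ≠ []) (c : Int) :
    ∃ (bx : Int) (k : Nat),
      (PySem.List.min2?
          (PySem.List.slice (PySem.List.sorted (pvFirst list_d).keys (fun x => x) false)
            (some (max (pvBisect (PySem.List.sorted (pvFirst list_d).keys (fun x => x) false) c
                (PySem.List.sorted (pvFirst list_d).keys (fun x => x) false).length 0
                ((PySem.List.sorted (pvFirst list_d).keys (fun x => x) false).length : Int) - 1) 0))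
            (some (pvBisect (PySem.List.sorted (pvFirst list_d).keys (fun x => x) false) c
                (PySem.List.sorted (pvFirst list_d).keys (fun x => x) false).length 0
                ((PySem.List.sorted (pvFirst list_d).keys (fun x => x) false).length : Int) + 1)))
          (fun x => |c - x|) (fun x => (pvFirst list_d).getD x 0)) = some bx ∧
      (pvFirst list_d).getD bx 0 = (k : Int) ∧
      (list_d.map (·.1))[k]? = some bx ∧
      pvBest c (list_d.map (·.1)) (|c - bx|) (k : Int) := by
  obtain ⟨hnd, hget⟩ := pvFirst_spec list_d
  set F := pvFirst list_d with hF
  set dx := list_d.map (·.1) with hdxdef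
  set xs := PySem.List.sorted F.keys (fun x => x) false with hxsdef
  set n := xs.length with hndef
  have hmem : ∀ x : Int, x ∈ xs ↔ x ∈ dx := by
    intro x
    rw [hxsdef, PySem.List.mem_sorted, pvDict_mem_keys, pvDict_contains_isSome, hget x,
        Option.isSome_map]
    exact PySem.List.index?_isSome_iff dx x
  have hndxs : xs.Nodup := ((PySem.List.sorted_perm F.keys (fun x => x) false).nodup_iff).mpr hnd
  have hple : xs.Pairwise (· ≤ ·) := PySem.List.sorted_pairwise F.keys (fun x => x)
  have hplt : xs.Pairwise (· < ·) := (hple.and hndxs).imp (fun h => lt_of_le_of_ne h.1 h.2)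
  have hmono := List.pairwise_iff_getElem.mp hplt
  have hmono? : ∀ (t u : Nat), t < u → ∀ y z, xs[t]? = some y → xs[u]? = some z → y < z := by
    intro t u htu y z hy hz
    have hu : u < n := by
      by_contra hcon
      rw [List.getElem?_eq_none (by omega)] at hz; cases hz
    have ht : t < n := by omega
    rw [List.getElem?_eq_getElem ht] at hy
    rw [List.getElem?_eq_getElem hu] at hz
    have h1 : xs[t] = y := by simpa using hy
    have h2 : xs[u] = z := by simpa using hz
    rw [← h1, ← h2]
    exact hmono t u ht hu htu
  have hxne : 0 < n := by
    rcases List.exists_mem_of_ne_nil list_d hd with ⟨p, hp⟩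
    have h1 : p.1 ∈ dx := by rw [hdxdef]; exact List.mem_map_of_mem hp
    exact List.length_pos_of_mem ((hmem p.1).mpr h1)
  obtain ⟨k, hkrun, hk0, hkn, hlow, hhigh⟩ :=
    pvBisect_spec xs c hple n 0 n (Nat.zero_le n) (le_refl n) (by omega)
      (by intro j hj x hx; omega)
      (by intro j hj x hx; rw [List.getElem?_eq_none (by omega)] at hx; cases hx)
  rw [Nat.cast_zero] at hkrun
  -- first-occurrence index data for each member of dx
  have hidx : ∀ y : Int, y ∈ dx → ∃ kd : Nat, F.getD y 0 = (kd : Int) ∧ dx[kd]? = some y ∧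
      (∀ j : Nat, j < kd → ∀ z, dx[j]? = some z → z ≠ y) := by
    intro y hy
    obtain ⟨kd, hkd⟩ := Option.isSome_iff_exists.mp ((PySem.List.index?_isSome_iff dx y).mpr hy)
    obtain ⟨hltk, hval, hfirst⟩ := PySem.List.getElem_of_index?_eq_some hkd
    refine ⟨kd, ?_, ?_, ?_⟩
    · show (F.get? y).getD 0 = (kd : Int)
      rw [hget y, hkd]
      rfl
    · rw [List.getElem?_eq_getElem hltk, hval]
    · intro j hj z hz
      have hjl : j < dx.length := by omega
      rw [List.getElem?_eq_getElem hjl] at hz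
      have hze : dx[j] = z := by simpa using hz
      rw [← hze]; exact hfirst j hj
  have hpos : ∀ y : Int, y ∈ dx → ∃ t : Nat, xs[t]? = some y := by
    intro y hy
    obtain ⟨t, ht, hxt⟩ := List.mem_iff_getElem.mp ((hmem y).mpr hy)
    exact ⟨t, by rw [List.getElem?_eq_getElem ht, hxt]⟩
  have habsl : ∀ y : Int, y < c → |c - y| = c - y := fun y h => abs_of_pos (by omega)
  have habsr : ∀ y : Int, ¬ y < c → |c - y| = y - c := by
    intro y h; rw [abs_sub_comm]; exact abs_of_nonneg (by omega)
  -- any member of dx is no closer to c than the better bracket candidate on its side;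
  -- and a member exactly as close as that candidate has the candidate's value
  have hside : ∀ (t : Nat) (x' : Int), xs[t]? = some x' →
      (t < k → ∀ xa, xs[k-1]? = some xa → |c - xa| ≤ |c - x'| ∧ (|c - x'| = |c - xa| → x' = xa)) ∧
      (k ≤ t → ∀ xb, xs[k]? = some xb → |c - xb| ≤ |c - x'| ∧ (|c - x'| = |c - xb| → x' = xb)) := by
    intro t x' hxt
    constructor
    · intro htk xa hxa
      have hcx : x' < c := hlow t htk x' hxt
      have hca : xa < c := hlow (k-1) (by omega) xa hxa
      have hle : x' ≤ xa := by
        rcases Nat.lt_or_ge t (k-1) with h | h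
        · exact le_of_lt (hmono? t (k-1) h x' xa hxt hxa)
        · have htt : t = k - 1 := by omega
          subst htt
          rw [hxt] at hxa
          have := Option.some.inj hxa
          omega
      have e1 := habsl _ hcx
      have e2 := habsl _ hca
      constructor
      · omega
      · intro heq; omega
    · intro htk xb hxb
      have hcx : ¬ x' < c := hhigh t htk x' hxt
      have hcb : ¬ xb < c := hhigh k (le_refl k) xb hxb
      have hle : xb ≤ x' := by
        rcases Nat.lt_or_ge k t with h | h
        · exact le_of_lt (hmono? k t h xb x' hxb hxt)
        · have htt : t = k := by omega
          subst htt
          rw [hxt] at hxb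
          have := Option.some.inj hxb
          omega
      have e1 := habsr _ hcx
      have e2 := habsr _ hcb
      constructor
      · omega
      · intro heq; omega
  rw [hkrun]
  have hsl : PySem.List.slice xs (some (max ((k : Int) - 1) 0)) (some ((k : Int) + 1))
      = (xs.drop (k-1)).take (k+1-(k-1)) := by
    rw [show (max ((k : Int) - 1) 0) = ((k - 1 : Nat) : Int) by omega,
        show ((k : Int) + 1) = ((k + 1 : Nat) : Int) by push_cast; ring]
    exact PySem.List.slice_natCast xs (k-1) (k+1)
  rw [hsl]
  -- assemble the result once the chosen candidate and the tie-break facts are known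
  have hfinish : ∀ bx : Int, bx ∈ xs →
      (∀ (j : Nat) (x' : Int), dx[j]? = some x' → |c - bx| ≤ |c - x'|) →
      (∀ (j : Nat) (x' : Int), dx[j]? = some x' → |c - bx| = |c - x'| → x' ≠ bx →
        ∃ kdx : Nat, F.getD x' 0 = (kdx : Int) ∧ kdx ≤ j ∧ F.getD bx 0 < (kdx : Int)) →
      ∃ (bx' : Int) (kk : Nat), some bx = some bx' ∧ F.getD bx' 0 = (kk : Int) ∧
        dx[kk]? = some bx' ∧ pvBest c dx (|c - bx'|) (kk : Int) := by
    intro bx hbxs hall htie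
    obtain ⟨kd, hkd, hdxkd, hfirst⟩ := hidx bx ((hmem bx).mp hbxs)
    refine ⟨bx, kd, rfl, hkd, hdxkd, kd, rfl, bx, hdxkd, rfl, hall, ?_⟩
    intro j hj x' hx'
    rcases lt_or_eq_of_le (hall j x' hx') with h | h
    · exact h
    · exfalso
      by_cases hxbx : x' = bx
      · subst hxbx; exact hfirst j hj x' hx' rfl
      · obtain ⟨kdx, hkdx, hkdxj, hlt2⟩ := htie j x' hx' h hxbx
        rw [hkd] at hlt2
        have : kd < kdx := by exact_mod_cast hlt2
        omega
  by_cases hkz : k = 0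
  · -- only the right candidate xs[0] exists
    subst hkz
    obtain ⟨b, hb⟩ : ∃ b, xs[0]? = some b := ⟨_, List.getElem?_eq_getElem hxne⟩
    have hcons : xs.drop 0 = b :: xs.drop 1 := by
      rw [List.drop_eq_getElem_cons hxne]
      rw [List.getElem?_eq_getElem hxne] at hb
      rw [Option.some.inj hb]
    have hcands : (xs.drop (0-1)).take (0+1-(0-1)) = [b] := by
      rw [show (0-1 : Nat) = 0 from rfl, hcons]
      rfl
    rw [hcands]
    refine hfinish b (List.mem_of_getElem? hb) ?_ ?_
    · intro j x' hj
      obtain ⟨t, hxt⟩ := hpos x' (List.mem_of_getElem? hj)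
      exact ((hside t x' hxt).2 (Nat.zero_le t) b hb).1
    · intro j x' hj heq hne
      exfalso
      obtain ⟨t, hxt⟩ := hpos x' (List.mem_of_getElem? hj)
      exact hne (((hside t x' hxt).2 (Nat.zero_le t) b hb).2 heq.symm)
  · by_cases hkn' : k = n
    · -- only the left candidate xs[n-1] exists
      have hk1 : 1 ≤ k := by omega
      have hnn : n - 1 < n := by omega
      obtain ⟨a, ha⟩ : ∃ a, xs[k-1]? = some a := by
        refine ⟨_, List.getElem?_eq_getElem (show k-1 < n by omega)⟩
      have hcons : xs.drop (k-1) = a :: xs.drop ((k-1)+1) := by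
        rw [List.drop_eq_getElem_cons (show k-1 < xs.length by omega)]
        rw [List.getElem?_eq_getElem (show k-1 < xs.length by omega)] at ha
        rw [Option.some.inj ha]
      have hdnil : xs.drop ((k-1)+1) = [] := by
        rw [show (k-1)+1 = n by omega, hndef]
        exact List.drop_length
      have hcands : (xs.drop (k-1)).take (k+1-(k-1)) = [a] := by
        rw [hcons, hdnil, show (k+1-(k-1)) = 2 by omega]
        rfl
      rw [hcands]
      refine hfinish a (List.mem_of_getElem? ha) ?_ ?_
      · intro j x' hj
        obtain ⟨t, hxt⟩ := hpos x' (List.mem_of_getElem? hj)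
        have ht : t < n := by
          by_contra hcon
          rw [List.getElem?_eq_none (by omega)] at hxt; cases hxt
        exact ((hside t x' hxt).1 (by omega) a ha).1
      · intro j x' hj heq hne
        exfalso
        obtain ⟨t, hxt⟩ := hpos x' (List.mem_of_getElem? hj)
        have ht : t < n := by
          by_contra hcon
          rw [List.getElem?_eq_none (by omega)] at hxt; cases hxt
        exact hne (((hside t x' hxt).1 (by omega) a ha).2 heq.symm)
    · -- both candidates xs[k-1] and xs[k] exist
      have hk1 : 1 ≤ k := by omega
      have hklt : k < n := by omega
      have hk1lt : k - 1 < n := by omega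
      obtain ⟨a, ha⟩ : ∃ a, xs[k-1]? = some a := ⟨_, List.getElem?_eq_getElem hk1lt⟩
      obtain ⟨b, hb⟩ : ∃ b, xs[k]? = some b := ⟨_, List.getElem?_eq_getElem hklt⟩
      have habdist : a < b := hmono? (k-1) k (by omega) a b ha hb
      have hcons1 : xs.drop (k-1) = a :: xs.drop ((k-1)+1) := by
        rw [List.drop_eq_getElem_cons hk1lt]
        rw [List.getElem?_eq_getElem hk1lt] at ha
        rw [Option.some.inj ha]
      have hcons2 : xs.drop k = b :: xs.drop (k+1) := by
        rw [List.drop_eq_getElem_cons hklt]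
        rw [List.getElem?_eq_getElem hklt] at hb
        rw [Option.some.inj hb]
      have hcands : (xs.drop (k-1)).take (k+1-(k-1)) = [a, b] := by
        rw [hcons1, show (k-1)+1 = k by omega, hcons2, show (k+1-(k-1)) = 2 by omega]
        rfl
      rw [hcands]
      obtain ⟨ka, hka, hdxka, hfirsta⟩ := hidx a ((hmem a).mp (List.mem_of_getElem? ha))
      obtain ⟨kb, hkb, hdxkb, hfirstb⟩ := hidx b ((hmem b).mp (List.mem_of_getElem? hb))
      have hkakb : ka ≠ kb := by
        intro hcon
        rw [hcon, hdxkb] at hdxka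
        have : b = a := Option.some.inj hdxka
        omega
      -- each member of dx is on one side or the other
      have hsplit : ∀ (j : Nat) (x' : Int), dx[j]? = some x' →
          (|c - a| ≤ |c - x'| ∧ (|c - x'| = |c - a| → x' = a)) ∨
          (|c - b| ≤ |c - x'| ∧ (|c - x'| = |c - b| → x' = b)) := by
        intro j x' hj
        obtain ⟨t, hxt⟩ := hpos x' (List.mem_of_getElem? hj)
        rcases Nat.lt_or_ge t k with htk | htk
        · exact Or.inl ((hside t x' hxt).1 htk a ha)
        · exact Or.inr ((hside t x' hxt).2 htk b hb)
      by_cases h1 : |c - b| < |c - a|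
      · have hmin : PySem.List.min2? [a, b] (fun x => |c - x|) (fun x => F.getD x 0)
            = some b := by
          simp [PySem.List.min2?, h1]
        rw [hmin]
        refine hfinish b (List.mem_of_getElem? hb) ?_ ?_
        · intro j x' hj
          rcases hsplit j x' hj with ⟨hle, _⟩ | ⟨hle, _⟩ <;> omega
        · intro j x' hj heq hne
          rcases hsplit j x' hj with ⟨hle, hpin⟩ | ⟨hle, hpin⟩
          · -- x' would be a, but a is strictly farther than b: impossible
            omega
          · exact absurd (hpin heq.symm) hne
      · by_cases h2 : |c - a| < |c - b|
        · have hmin : PySem.List.min2? [a, b] (fun x => |c - x|) (fun x => F.getD x 0)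
              = some a := by
            simp [PySem.List.min2?, h1, h2]
          rw [hmin]
          refine hfinish a (List.mem_of_getElem? ha) ?_ ?_
          · intro j x' hj
            rcases hsplit j x' hj with ⟨hle, _⟩ | ⟨hle, _⟩ <;> omega
          · intro j x' hj heq hne
            rcases hsplit j x' hj with ⟨hle, hpin⟩ | ⟨hle, hpin⟩
            · exact absurd (hpin heq.symm) hne
            · omega
        · -- tie on the distance: the smaller first-occurrence index wins
          have heqd : |c - a| = |c - b| := by omega
          by_cases h3 : F.getD b 0 < F.getD a 0
          · have hmin : PySem.List.min2? [a, b] (fun x => |c - x|) (fun x => F.getD x 0)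
                = some b := by
              simp [PySem.List.min2?, h1, h2, h3]
            rw [hmin]
            refine hfinish b (List.mem_of_getElem? hb) ?_ ?_
            · intro j x' hj
              rcases hsplit j x' hj with ⟨hle, _⟩ | ⟨hle, _⟩ <;> omega
            · intro j x' hj heq hne
              rcases hsplit j x' hj with ⟨hle, hpin⟩ | ⟨hle, hpin⟩
              · have hx'a : x' = a := hpin (by omega)
                subst hx'a
                refine ⟨ka, hka, ?_, by rw [hka] at h3; exact h3⟩
                by_contra hcon
                exact hfirsta j (by omega) x' hj rfl
              · exact absurd (hpin heq.symm) hne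
          · have hmin : PySem.List.min2? [a, b] (fun x => |c - x|) (fun x => F.getD x 0)
                = some a := by
              simp [PySem.List.min2?, h1, h3]
            rw [hmin]
            refine hfinish a (List.mem_of_getElem? ha) ?_ ?_
            · intro j x' hj
              rcases hsplit j x' hj with ⟨hle, _⟩ | ⟨hle, _⟩ <;> omega
            · intro j x' hj heq hne
              rcases hsplit j x' hj with ⟨hle, hpin⟩ | ⟨hle, hpin⟩
              · exact absurd (hpin heq.symm) hne
              · have hx'b : x' = b := hpin (by omega)
                subst hx'b
                rw [hka, hkb] at h3
                have hkakb' : ka < kb := by omega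
                refine ⟨kb, hkb, ?_, by rw [hka]; exact_mod_cast hkakb'⟩
                by_contra hcon
                exact hfirstb j (by omega) x' hj rfl

lemma pv_step_eq (list_d : List (Int × Int)) (hd : list_d ≠ []) (res : List (Int × Int))
    (p : Int × Int) :
    (res ++ [((pvAScan p.1 list_d 0 (none, -1)).2,
        p.1 + (match PySem.List.pyGet? list_d (pvAScan p.1 list_d 0 (none, -1)).2 with
               | some q => q.1 | none => 0))])
    = (match PySem.List.min2?
          (PySem.List.slice (PySem.List.sorted (pvFirst list_d).keys (fun x => x) false)
            (some (max (pvBisect (PySem.List.sorted (pvFirst list_d).keys (fun x => x) false) p.1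
                (PySem.List.sorted (pvFirst list_d).keys (fun x => x) false).length 0
                ((PySem.List.sorted (pvFirst list_d).keys (fun x => x) false).length : Int) - 1) 0))
            (some (pvBisect (PySem.List.sorted (pvFirst list_d).keys (fun x => x) false) p.1
                (PySem.List.sorted (pvFirst list_d).keys (fun x => x) false).length 0
                ((PySem.List.sorted (pvFirst list_d).keys (fun x => x) false).length : Int) + 1)))
          (fun x => |p.1 - x|) (fun x => (pvFirst list_d).getD x 0) with
       | some best_x => res ++ [((pvFirst list_d).getD best_x 0, p.1 + best_x)]
       | none => res) := by
  obtain ⟨bx, k, hmin2, hgetD, hdxk, hbest⟩ := pvAlt_step list_d hd p.1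
  rw [hmin2]
  obtain ⟨⟨x0, y0⟩, drest, rfl⟩ : ∃ d0 drest, list_d = d0 :: drest := by
    cases list_d with
    | nil => exact absurd rfl hd
    | cons a b => exact ⟨a, b, rfl⟩
  obtain ⟨m, i, hrun, hbest'⟩ := pvAScan_best p.1 x0 y0 drest
  obtain ⟨hm, hi⟩ := pvBest_unique hbest' hbest
  obtain ⟨q, hq, hqbx⟩ : ∃ q, ((x0, y0) :: drest)[k]? = some q ∧ q.1 = bx := by
    rw [List.getElem?_map] at hdxk
    cases hq : ((x0, y0) :: drest)[k]? with
    | none => rw [hq] at hdxk; cases hdxk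
    | some q => rw [hq] at hdxk; exact ⟨q, rfl, by simpa using hdxk⟩
  rw [hrun]
  dsimp only
  rw [hgetD, hi, PySem.List.pyGet?_natCast, hq]
  dsimp only
  rw [hqbx]

-- ===== VERDICT (by name: the statement is the Claim_ definition above) =====
theorem compute_smallest_addition_spec : Claim_equal_compute_smallest_addition := by
  intro list_c list_d _hdom hpre
  unfold Spec_compute_smallest_addition
  rcases hpre with hc | hd
  · subst hc; rfl
  show compute_smallest_addition list_c list_d = compute_smallest_addition_alt list_c list_d
  unfold compute_smallest_addition compute_smallest_addition_alt
  refine PySem.List.foldl_congr_mem list_c _ _ [] ?_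
  intro acc p _hp
  exact pv_step_eq list_d hd acc p
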